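-- pv_equiv track=rewrite | github.com/abollaert/aoc2024 | d9.py | find_first_free_index
-- ===== SOURCE A (Python) =====
-- def find_first_free_index(disk: list[int], size: int) -> int:
--     for i in range(len(disk)):
--         if disk[i] == -1:
--             large_enough: bool = True
--
--             for j in range(size):
--                 if i + j >= len(disk):
--                     return -1
--
--                 if disk[i + j] != -1:
--                     large_enough = False
--                     break
--
--             if large_enough:
--                 return i
--
--     return -1
-- ===== SOURCE B (Python) =====
-- def find_first_free_index(disk: list[int], size: int) -> int:
--     # Single pass: track the length of the current run of free cells (one loop, no rescan).
--     # A placement needs at least one actual cell, so the run target is max(1, size).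
--     need = max(1, size)
--     run = 0
--     for i, v in enumerate(disk):
--         run = run + 1 if v == -1 else 0
--         if run == need:
--             return i - need + 1
--     return -1
-- ===== Notes on version B (the rewrite author's own statement) =====
-- stated objective: simpler
-- what changed: Replaces the nested rescan (for each candidate index, re-check the next size cells) with a single left-to-right pass that maintains the length of the current run of free cells and returns as soon as it reaches max(1, size).
import Mathlib
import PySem

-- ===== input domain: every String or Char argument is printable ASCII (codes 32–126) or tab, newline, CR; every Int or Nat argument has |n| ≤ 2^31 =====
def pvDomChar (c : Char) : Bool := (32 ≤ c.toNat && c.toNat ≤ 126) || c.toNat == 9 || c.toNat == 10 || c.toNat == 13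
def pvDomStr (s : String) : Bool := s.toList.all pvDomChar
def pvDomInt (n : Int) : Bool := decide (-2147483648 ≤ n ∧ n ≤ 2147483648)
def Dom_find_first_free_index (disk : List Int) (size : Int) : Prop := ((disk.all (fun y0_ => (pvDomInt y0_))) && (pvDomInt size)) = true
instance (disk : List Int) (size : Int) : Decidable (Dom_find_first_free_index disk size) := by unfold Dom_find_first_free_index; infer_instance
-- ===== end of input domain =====

-- B replaces A's nested rescan by a single left-to-right pass counting consecutive free cells (simpler; same measured speed).

-- ===== PORT A =====
-- inner loop 'for j in range(size)': fuel = number of remaining iterations, the list is the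
-- suffix disk[i+j:] (disk[i+j] is its head). 'none' = the 'return -1' on i+j >= len(disk);
-- 'some b' = the loop finished with large_enough = b.
def pvAInner : Nat → List Int → Option Bool
  | 0, _ => some true
  | _ + 1, [] => none
  | n + 1, v :: rest => if v ≠ -1 then some false else pvAInner n rest

-- outer loop 'for i in range(len(disk))': walks the suffix disk[i:], carrying the index i.
def pvAOuter (size : Int) : List Int → Int → Int
  | [], _ => -1
  | v :: rest, i =>
    if v = -1 then
      match pvAInner size.toNat (v :: rest) with
      | none => -1
      | some true => i
      | some false => pvAOuter size rest (i + 1)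
    else pvAOuter size rest (i + 1)

def find_first_free_index (disk : List Int) (size : Int) : Int :=
  pvAOuter size disk 0

-- ===== PORT B =====
def pvBLoop (need : Int) : List Int → Int → Int → Int
  | [], _, _ => -1
  | v :: rest, i, run =>
    let run' := if v = -1 then run + 1 else 0
    if run' = need then i - need + 1 else pvBLoop need rest (i + 1) run'

def find_first_free_index_alt (disk : List Int) (size : Int) : Int :=
  pvBLoop (max 1 size) disk 0 0

-- ===== PRECONDITION & SPEC =====
def Spec_find_first_free_index (disk : List Int) (size : Int) (out : Int) : Prop := out = find_first_free_index_alt disk size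
instance (disk : List Int) (size : Int) (out : Int) : Decidable (Spec_find_first_free_index disk size out) := by unfold Spec_find_first_free_index; infer_instance

-- ===== CLAIM (what is proved, stated in full; the proofs are below) =====
def Claim_equal_find_first_free_index : Prop := ∀ (disk : List Int) (size : Int), Dom_find_first_free_index disk size → Spec_find_first_free_index disk size (find_first_free_index disk size)

-- ===== LEMMAS AND PROOFS =====

-- length of the prefix of free cells (-1s)
def freeLen : List Int → Nat
  | [] => 0
  | v :: rest => if v = -1 then freeLen rest + 1 else 0

theorem freeLen_le_length (l : List Int) : freeLen l ≤ l.length := by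
  induction l with
  | nil => simp [freeLen]
  | cons v rest ih =>
    by_cases h : v = -1
    · simp [freeLen, h]; omega
    · simp [freeLen, h]

theorem pvAInner_char (n : Nat) (l : List Int) :
    pvAInner n l = if n ≤ freeLen l then some true
                   else if freeLen l = l.length then none else some false := by
  induction n generalizing l with
  | zero => simp [pvAInner]
  | succ n ih =>
    cases l with
    | nil => simp [pvAInner, freeLen]
    | cons v rest =>
      by_cases h : v = -1
      · subst h
        have hfl : freeLen ((-1:Int) :: rest) = freeLen rest + 1 := by simp [freeLen]
        rw [show pvAInner (n+1) ((-1:Int) :: rest) = pvAInner n rest from by simp [pvAInner]]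
        rw [ih rest, hfl]
        simp only [List.length_cons]
        by_cases h1 : n ≤ freeLen rest
        · rw [if_pos h1, if_pos (show n + 1 ≤ freeLen rest + 1 by omega)]
        · rw [if_neg h1, if_neg (show ¬ n + 1 ≤ freeLen rest + 1 by omega)]
          by_cases h2 : freeLen rest = rest.length
          · rw [if_pos h2, if_pos (show freeLen rest + 1 = rest.length + 1 by omega)]
          · rw [if_neg h2, if_neg (show ¬ freeLen rest + 1 = rest.length + 1 by omega)]
      · have hfl : freeLen (v :: rest) = 0 := by simp [freeLen, h]
        rw [show pvAInner (n+1) (v :: rest) = some false from by simp [pvAInner, h]]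
        rw [hfl, if_neg (by omega), if_neg (by simp)]

theorem pvBLoop_hit (need : Int) (l : List Int) (i run : Int)
    (hr : run < need) (hf : need - run ≤ (freeLen l : Int)) :
    pvBLoop need l i run = i - run := by
  induction l generalizing i run with
  | nil => simp [freeLen] at hf; omega
  | cons v rest ih =>
    by_cases h : v = -1
    · have hfl : freeLen (v :: rest) = freeLen rest + 1 := by simp [freeLen, h]
      rw [hfl] at hf
      push_cast at hf
      simp only [pvBLoop, if_pos h]
      by_cases he : run + 1 = need
      · rw [if_pos he]; omega
      · rw [if_neg he, ih (i + 1) (run + 1) (by omega) (by omega)]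
        omega
    · exfalso; simp [freeLen, h] at hf; omega

theorem pvBLoop_allfree (need : Int) (l : List Int) (i run : Int)
    (hall : freeLen l = l.length) (hf : (freeLen l : Int) < need - run) :
    pvBLoop need l i run = -1 := by
  induction l generalizing i run with
  | nil => simp [pvBLoop]
  | cons v rest ih =>
    have h : v = -1 := by
      by_contra h
      simp [freeLen, h] at hall
    have hfl : freeLen (v :: rest) = freeLen rest + 1 := by simp [freeLen, h]
    rw [hfl] at hf hall
    push_cast at hf
    simp only [List.length_cons] at hall
    simp only [pvBLoop, if_pos h]
    rw [if_neg (show ¬ run + 1 = need by omega)]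
    exact ih (i + 1) (run + 1) (by omega) (by omega)

theorem pvBLoop_skip (need : Int) (l : List Int) (i run : Int)
    (hr : 0 ≤ run) (hf : (freeLen l : Int) < need - run) (hb : freeLen l < l.length) :
    pvBLoop need l i run = pvBLoop need (l.drop (freeLen l + 1)) (i + (freeLen l : Int) + 1) 0 := by
  induction l generalizing i run with
  | nil => simp at hb
  | cons v rest ih =>
    by_cases h : v = -1
    · have hfl : freeLen (v :: rest) = freeLen rest + 1 := by simp [freeLen, h]
      rw [hfl] at hf hb ⊢
      push_cast at hf
      simp only [List.length_cons] at hb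
      simp only [pvBLoop, if_pos h]
      rw [if_neg (show ¬ run + 1 = need by omega)]
      rw [ih (i + 1) (run + 1) (by omega) (by omega) (by omega)]
      simp only [List.drop_succ_cons]
      congr 1
      push_cast
      ring
    · have hfl : freeLen (v :: rest) = 0 := by simp [freeLen, h]
      rw [hfl] at hf ⊢
      push_cast at hf
      simp only [pvBLoop, if_neg h]
      rw [if_neg (show ¬ (0 : Int) = need by omega)]
      norm_num

theorem pvAOuter_skip (size : Int) (l : List Int) (i : Int)
    (hf : freeLen l < size.toNat) (hb : freeLen l < l.length) :
    pvAOuter size l i = pvAOuter size (l.drop (freeLen l + 1)) (i + (freeLen l : Int) + 1) := by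
  induction l generalizing i with
  | nil => simp at hb
  | cons v rest ih =>
    by_cases h : v = -1
    · have hfl : freeLen (v :: rest) = freeLen rest + 1 := by simp [freeLen, h]
      rw [hfl] at hf hb ⊢
      simp only [List.length_cons] at hb
      simp only [pvAOuter, if_pos h, pvAInner_char, hfl, List.length_cons]
      rw [if_neg (show ¬ size.toNat ≤ freeLen rest + 1 by omega),
          if_neg (show ¬ freeLen rest + 1 = rest.length + 1 by omega)]
      rw [ih (i + 1) (by omega) (by omega)]
      simp only [List.drop_succ_cons]
      congr 1
      push_cast
      ring
    · have hfl : freeLen (v :: rest) = 0 := by simp [freeLen, h]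
      rw [hfl]
      simp only [pvAOuter, if_neg h]
      norm_num

theorem main_lemma (size : Int) (n : Nat) :
    ∀ (l : List Int) (i : Int), l.length ≤ n → pvAOuter size l i = pvBLoop (max 1 size) l i 0 := by
  induction n with
  | zero =>
    intro l i hn
    have : l = [] := List.eq_nil_of_length_eq_zero (by omega)
    subst this
    simp [pvAOuter, pvBLoop]
  | succ n ih =>
    intro l i hn
    cases l with
    | nil => simp [pvAOuter, pvBLoop]
    | cons v rest =>
      by_cases h : v = -1
      · have hfl : freeLen (v :: rest) = freeLen rest + 1 := by simp [freeLen, h]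
        set f := freeLen (v :: rest) with hfdef
        have hf1 : 1 ≤ f := by omega
        by_cases h1 : size.toNat ≤ f
        · -- A returns i; B completes the run and returns i
          have hA : pvAOuter size (v :: rest) i = i := by
            simp only [pvAOuter, if_pos h, pvAInner_char]
            rw [if_pos h1]
          have hneed : max 1 size ≤ (f : Int) := by
            rcases (em (size ≤ 1)) with hs | hs
            · have : max 1 size = 1 := by omega
              rw [this]; exact_mod_cast hf1
            · have : max 1 size = size := by omega
              rw [this]
              have : size = (size.toNat : Int) := by omega
              rw [this]; exact_mod_cast h1
          rw [hA, pvBLoop_hit (max 1 size) (v :: rest) i 0 (by omega) (by omega)]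
          omega
        · rw [not_le] at h1
          have hneed : (f : Int) < max 1 size := by
            have h2 : 2 ≤ size.toNat := by omega
            have : max 1 size = size := by omega
            rw [this]
            have : size = (size.toNat : Int) := by omega
            rw [this]; exact_mod_cast h1
          by_cases h2 : f = (v :: rest).length
          · -- A returns -1 via the inner 'return -1'; B never completes the run
            have hA : pvAOuter size (v :: rest) i = -1 := by
              simp only [pvAOuter, if_pos h, pvAInner_char]
              rw [if_neg (by omega), if_pos h2]
            rw [hA, pvBLoop_allfree (max 1 size) (v :: rest) i 0 h2 (by omega)]
          · have hb : f < (v :: rest).length := lt_of_le_of_ne (freeLen_le_length _) h2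
            rw [pvAOuter_skip size (v :: rest) i h1 hb,
                pvBLoop_skip (max 1 size) (v :: rest) i 0 le_rfl (by omega) hb]
            exact ih _ _ (by simp [List.length_drop] at *; omega)
      · have hfl : freeLen (v :: rest) = 0 := by simp [freeLen, h]
        simp only [pvAOuter, pvBLoop, if_neg h]
        rw [if_neg (by omega)]
        exact ih rest (i + 1) (by simp at hn; omega)

-- ===== VERDICT (by name: the statement is the Claim_ definition above) =====
theorem find_first_free_index_spec : Claim_equal_find_first_free_index := by
  intro disk size _
  unfold Spec_find_first_free_index find_first_free_index find_first_free_index_alt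
  exact main_lemma size disk.length disk 0 le_rfl
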